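-- pv_equiv track=rewrite | github.com/tungbo20021/ChamThi | Part2.py | find_closest_indices
-- ===== SOURCE A (Python) =====
-- def find_closest_indices(sorted_choice, row_circle):
--     closest_indices = []
--     for choice_coord in sorted_choice:
--         choice_y = choice_coord[0][1]
--         min_error = float('inf')
--         closest_index = None
--         for i, circle_y in enumerate(row_circle):
--             error = abs(choice_y - circle_y)
--             if error < min_error:
--                 min_error = error
--                 closest_index = i
--         closest_indices.append(closest_index)
--     return closest_indices
-- ===== SOURCE B (Python) =====
-- def _bisect_left(a, x):
--     lo, hi = 0, len(a)
--     while lo < hi: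
--         mid = (lo + hi) // 2
--         if a[mid] < x:
--             lo = mid + 1
--         else:
--             hi = mid
--     return lo
--
--
-- def find_closest_indices(sorted_choice, row_circle):
--     # map each distinct circle y to its first index, once
--     first_idx = {}
--     for i, v in enumerate(row_circle):
--         if v not in first_idx:
--             first_idx[v] = i
--     vals = sorted(first_idx)
--     n = len(vals)
--     out = []
--     for choice_coord in sorted_choice:
--         y = choice_coord[0][1]
--         if n == 0:
--             out.append(None)
--         else:
--             p = _bisect_left(vals, y)
--             if p == 0:
--                 out.append(first_idx[vals[0]])
--             elif p == n:
--                 out.append(first_idx[vals[n - 1]])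
--             else:
--                 lo_v, hi_v = vals[p - 1], vals[p]
--                 il, ih = first_idx[lo_v], first_idx[hi_v]
--                 if y - lo_v < hi_v - y or (y - lo_v == hi_v - y and il < ih):
--                     out.append(il)
--                 else:
--                     out.append(ih)
--     return out
-- ===== Notes on version B (the rewrite author's own statement) =====
-- stated objective: faster
-- what changed: B builds a first-occurrence-index map of the circle y-values once, sorts the distinct values, and answers each choice by binary search over the sorted values (comparing the two neighbouring candidates, ties to the lower first index), instead of A's linear scan of row_circle for every choice.
import Mathlib
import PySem

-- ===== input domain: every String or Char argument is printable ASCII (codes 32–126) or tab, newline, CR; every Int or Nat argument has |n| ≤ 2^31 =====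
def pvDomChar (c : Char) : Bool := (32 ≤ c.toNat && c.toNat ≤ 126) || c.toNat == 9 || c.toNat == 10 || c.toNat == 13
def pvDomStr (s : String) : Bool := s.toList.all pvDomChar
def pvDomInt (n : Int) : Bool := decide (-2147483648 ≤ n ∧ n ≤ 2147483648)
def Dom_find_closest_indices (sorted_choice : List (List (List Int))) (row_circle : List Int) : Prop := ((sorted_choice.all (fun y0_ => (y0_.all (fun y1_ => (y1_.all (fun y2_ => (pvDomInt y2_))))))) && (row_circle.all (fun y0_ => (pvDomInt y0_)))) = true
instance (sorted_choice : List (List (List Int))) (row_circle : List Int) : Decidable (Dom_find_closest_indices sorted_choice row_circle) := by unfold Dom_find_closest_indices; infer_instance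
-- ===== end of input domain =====

-- B replaces A's per-choice linear scan of row_circle by a first-index map + sorted distinct
-- values + binary search per choice (objective: faster, O((n+m) log n) instead of O(m·n)).

-- ===== PORT A =====
-- inner 'for i, circle_y in enumerate(row_circle)' loop of A (min_error = none models float('inf'))
def pvScanA (choice_y : Int) (row_circle : List Int) : Option Int × Option Int :=
  (PySem.List.enumerate row_circle 0).foldl
    (fun st p =>
      let error := |choice_y - p.2|
      match st.1 with
      | none => (some error, some p.1)
      | some m => if error < m then (some error, some p.1) else st)
    (none, none)

def find_closest_indices (sorted_choice : List (List (List Int))) (row_circle : List Int) : List (Option Int) :=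
  sorted_choice.foldl
    (fun closest_indices choice_coord =>
      -- choice_coord[0][1]; Pre_ guarantees both indices are in range, default never read
      let choice_y := ((PySem.List.pyGet? choice_coord 0).bind (fun r => PySem.List.pyGet? r 1)).getD 0
      closest_indices ++ [(pvScanA choice_y row_circle).2])
    []

-- ===== PORT B =====
-- first_idx = {} ; for i, v in enumerate(row_circle): if v not in first_idx: first_idx[v] = i
def pvFirstIdx (row_circle : List Int) : PySem.Dict Int Int :=
  (PySem.List.enumerate row_circle 0).foldl
    (fun d p => if ¬ d.contains p.2 then d.insert p.2 p.1 else d)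
    PySem.Dict.empty

-- the per-choice body of B; first_idx lookups are always on present keys, list indices always
-- in range, so the hand-ported defaults are never read
def pvQueryB (first_idx : PySem.Dict Int Int) (vals : List Int) (n : Nat) (y : Int) : Option Int :=
  if n = 0 then none
  else
    let p := PySem.List.bisectLeft vals y
    if p = 0 then some (first_idx.getD (vals.getD 0 0) 0)
    else if p = n then some (first_idx.getD (vals.getD (n - 1) 0) 0)
    else
      let lo_v := vals.getD (p - 1) 0
      let hi_v := vals.getD p 0
      let il := first_idx.getD lo_v 0
      let ih := first_idx.getD hi_v 0
      if y - lo_v < hi_v - y ∨ (y - lo_v = hi_v - y ∧ il < ih) then some il else some ih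

def find_closest_indices_alt (sorted_choice : List (List (List Int))) (row_circle : List Int) : List (Option Int) :=
  let first_idx := pvFirstIdx row_circle
  let vals := PySem.List.sorted first_idx.keys (fun x => x) false
  let n := vals.length
  sorted_choice.foldl
    (fun out choice_coord =>
      let y := ((PySem.List.pyGet? choice_coord 0).bind (fun r => PySem.List.pyGet? r 1)).getD 0
      out ++ [pvQueryB first_idx vals n y])
    []

-- ===== PRECONDITION & SPEC =====
-- A raises IndexError on choice_coord[0][1] when a choice entry is empty or its first row has
-- fewer than two coordinates; exactly those inputs are excluded.
def Pre_find_closest_indices (sorted_choice : List (List (List Int))) (row_circle : List Int) : Prop :=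
  ∀ cc ∈ sorted_choice, cc ≠ [] ∧ 2 ≤ cc.headI.length
instance (sorted_choice : List (List (List Int))) (row_circle : List Int) : Decidable (Pre_find_closest_indices sorted_choice row_circle) := by unfold Pre_find_closest_indices; infer_instance

def pvWitness_find_closest_indices : List (List (List Int)) × List Int := ([[[5, 3]], [[2, 7]]], [1, 4, 4, 9])

def Spec_find_closest_indices (sorted_choice : List (List (List Int))) (row_circle : List Int) (out : List (Option Int)) : Prop := out = find_closest_indices_alt sorted_choice row_circle
instance (sorted_choice : List (List (List Int))) (row_circle : List Int) (out : List (Option Int)) : Decidable (Spec_find_closest_indices sorted_choice row_circle out) := by unfold Spec_find_closest_indices; infer_instance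

-- ===== CLAIM (what is proved, stated in full; the proofs are below) =====
def Claim_equal_find_closest_indices : Prop := ∀ (sorted_choice : List (List (List Int))) (row_circle : List Int), Dom_find_closest_indices sorted_choice row_circle → Pre_find_closest_indices sorted_choice row_circle → Spec_find_closest_indices sorted_choice row_circle (find_closest_indices sorted_choice row_circle)

-- ===== LEMMAS AND PROOFS =====

theorem pvWitness_ok : Dom_find_closest_indices pvWitness_find_closest_indices.1 pvWitness_find_closest_indices.2 ∧ Pre_find_closest_indices pvWitness_find_closest_indices.1 pvWitness_find_closest_indices.2 := by decide

-- abs helpers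
theorem pvAbs_le (y w : Int) (h : y ≤ w) : |y - w| = w - y := by
  rw [abs_sub_comm]; exact abs_of_nonneg (by omega)
theorem pvAbs_ge (y w : Int) (h : w ≤ y) : |y - w| = y - w := abs_of_nonneg (by omega)

-- ---- A-side characterisation ----
-- the first-argmin property A's scan computes
def pvBest (y : Int) (rc : List Int) (j : Nat) : Prop :=
  ∃ hj : j < rc.length,
    (∀ k, (hk : k < rc.length) → |y - rc[j]| ≤ |y - rc[k]|) ∧
    (∀ k, (hk : k < rc.length) → k < j → |y - rc[j]| < |y - rc[k]|)

theorem pvScanA_spec (y : Int) (rc : List Int) (hne : rc ≠ []) :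
    ∃ (j : Nat) (hj : j < rc.length),
      pvScanA y rc = (some |y - rc[j]|, some (j : Int)) ∧ pvBest y rc j := by
  induction rc using List.reverseRecOn with
  | nil => exact absurd rfl hne
  | append_singleton t v ih =>
    by_cases ht : t = []
    · subst ht
      refine ⟨0, by simp, ?_, by simp, ?_, ?_⟩
      · simp [pvScanA, PySem.List.enumerate_cons, PySem.List.enumerate_nil]
      · intro k hk
        have hk0 : k = 0 := by simp at hk; omega
        subst hk0; exact le_refl _
      · intro k hk hk0; omega
    · obtain ⟨j, hj, hstate, hjlt, hmin, hfirst⟩ := ih ht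
      have hstep : pvScanA y (t ++ [v]) =
          (if |y - v| < |y - t[j]| then (some |y - v|, some (t.length : Int))
           else (some |y - t[j]|, some (j : Int))) := by
        unfold pvScanA at hstate ⊢
        rw [PySem.List.enumerate_append, List.foldl_append, hstate]
        simp [PySem.List.enumerate_cons, PySem.List.enumerate_nil]
      by_cases hlt : |y - v| < |y - t[j]|
      · refine ⟨t.length, by simp, ?_, by simp, ?_, ?_⟩
        · rw [hstep, if_pos hlt, List.getElem_concat_length rfl]
        · intro k hk
          rw [List.getElem_concat_length rfl]
          rcases Nat.lt_or_ge k t.length with h | h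
          · rw [List.getElem_append_left h]
            exact le_of_lt (lt_of_lt_of_le hlt (hmin k h))
          · have : k = t.length := by simp at hk; omega
            subst this; rw [List.getElem_concat_length rfl]
        · intro k hk hkl
          rw [List.getElem_concat_length rfl, List.getElem_append_left hkl]
          exact lt_of_lt_of_le hlt (hmin k hkl)
      · refine ⟨j, by simp; omega, ?_, by simp; omega, ?_, ?_⟩
        · rw [hstep, if_neg hlt, List.getElem_append_left hjlt]
        · intro k hk
          rw [List.getElem_append_left hjlt]
          rcases Nat.lt_or_ge k t.length with h | h
          · rw [List.getElem_append_left h]; exact hmin k h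
          · have : k = t.length := by simp at hk; omega
            subst this; rw [List.getElem_concat_length rfl]; omega
        · intro k hk hkj
          rw [List.getElem_append_left hjlt, List.getElem_append_left (by omega)]
          exact hfirst k (by omega) hkj

theorem pvBest_unique (y : Int) (rc : List Int) (j1 j2 : Nat)
    (h1 : pvBest y rc j1) (h2 : pvBest y rc j2) : j1 = j2 := by
  obtain ⟨hl1, hmin1, hfirst1⟩ := h1
  obtain ⟨hl2, hmin2, hfirst2⟩ := h2
  rcases Nat.lt_trichotomy j1 j2 with h | h | h
  · have := hfirst2 j1 hl1 h
    have := hmin1 j2 hl2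
    omega
  · exact h
  · have := hfirst1 j2 hl2 h
    have := hmin2 j1 hl1
    omega

-- ---- B-side: dict of first indices ----
theorem pvFirstIdx_get? (rc : List Int) (v : Int) :
    (pvFirstIdx rc).get? v = (PySem.List.index? rc v).map (fun n => (n : Int)) := by
  have aux : ∀ (rc : List Int) (s : Int) (d : PySem.Dict Int Int) (v : Int),
      ((PySem.List.enumerate rc s).foldl
          (fun d p => if ¬ d.contains p.2 then d.insert p.2 p.1 else d) d).get? v
        = (d.get? v).or ((PySem.List.index? rc v).map (fun n => s + (n : Int))) := by
    intro rc
    induction rc with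
    | nil =>
      intro s d v
      rw [PySem.List.enumerate_nil]
      simp [PySem.List.index?]
    | cons x t ih =>
      intro s d v
      rw [PySem.List.enumerate_cons]
      simp only [List.foldl_cons]
      rw [ih]
      by_cases hvx : v = x
      · subst hvx
        by_cases hc : d.contains v = true
        · rw [if_neg (by simp [hc])]
          have hs : (d.get? v).isSome := by rw [← PySem.Dict.contains_eq_isSome_get?]; exact hc
          obtain ⟨w, hw⟩ := Option.isSome_iff_exists.mp hs
          simp [hw]
        · rw [if_pos (by simp [hc])]
          have hn : d.get? v = none := by
            have := PySem.Dict.contains_eq_isSome_get? d v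
            rw [Bool.not_eq_true] at hc
            rw [hc] at this
            exact Option.not_isSome_iff_eq_none.mp (by simp [← this])
          rw [PySem.List.index?_cons_self]
          simp [hn, PySem.Dict.get?_insert_self]
      · have hget : ∀ d' : PySem.Dict Int Int,
            (if ¬ d'.contains x then d'.insert x s else d').get? v = d'.get? v := by
          intro d'
          split_ifs with h
          · rfl
          · rw [PySem.Dict.get?_insert]; rw [if_neg hvx]
        rw [hget]
        rw [PySem.List.index?_cons_of_ne t (fun h => hvx h.symm)]
        cases hdv : d.get? v with
        | some w => simp [hdv]
        | none =>
          cases hidx : PySem.List.index? t v with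
          | none => simp [hidx, hdv]
          | some m =>
            simp [hidx, hdv]
            omega
  have := aux rc 0 PySem.Dict.empty v
  unfold pvFirstIdx
  rw [this]
  simp

theorem pvFirstIdx_mem_keys (rc : List Int) (v : Int) :
    v ∈ (pvFirstIdx rc).keys ↔ v ∈ rc := by
  rw [← not_iff_not, ← PySem.Dict.get?_eq_none_iff_not_mem_keys, pvFirstIdx_get?]
  cases hidx : PySem.List.index? rc v with
  | none => simp [hidx, (PySem.List.index?_eq_none_iff rc v).mp hidx]
  | some m =>
    have hmem : v ∈ rc := by
      have h2 := PySem.List.index?_isSome_iff rc v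
      rw [hidx] at h2
      exact h2.mp rfl
    simp [hidx, hmem]

-- first occurrence index is minimal among all occurrences
theorem pvIndex?_le (rc : List Int) (k : Nat) (hk : k < rc.length) (m : Nat)
    (hm : PySem.List.index? rc rc[k] = some m) : m ≤ k := by
  by_contra hc
  obtain ⟨hml, _, hne⟩ := PySem.List.getElem_of_index?_eq_some hm
  exact hne k (by omega) rfl

-- the chosen value's first index is the Best index
theorem pvBest_of_value (y : Int) (rc : List Int) (v : Int) (j : Nat)
    (hj : PySem.List.index? rc v = some j)
    (hmin : ∀ w ∈ rc, |y - v| ≤ |y - w|)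
    (htie : ∀ w ∈ rc, |y - w| = |y - v| → ∀ m, PySem.List.index? rc w = some m → j ≤ m) :
    pvBest y rc j := by
  obtain ⟨hjl, hjv, _⟩ := PySem.List.getElem_of_index?_eq_some hj
  refine ⟨hjl, ?_, ?_⟩
  · intro k hk
    rw [hjv]
    exact hmin rc[k] (List.getElem_mem hk)
  · intro k hk hkj
    rw [hjv]
    have hle := hmin rc[k] (List.getElem_mem hk)
    rcases hle.lt_or_eq with h | h
    · exact h
    · exfalso
      have hmem : rc[k] ∈ rc := List.getElem_mem hk
      have hs : (PySem.List.index? rc rc[k]).isSome :=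
        (PySem.List.index?_isSome_iff rc rc[k]).mpr hmem
      obtain ⟨m, hm⟩ := Option.isSome_iff_exists.mp hs
      have h1 := htie rc[k] hmem h.symm m hm
      have h2 := pvIndex?_le rc k hk m hm
      omega

-- ---- B-side: per-query result is the Best index ----
theorem pvQueryB_best (y : Int) (rc : List Int) (hne : rc ≠ []) :
    ∃ (j : Nat), pvQueryB (pvFirstIdx rc)
        (PySem.List.sorted (pvFirstIdx rc).keys (fun x => x) false)
        (PySem.List.sorted (pvFirstIdx rc).keys (fun x => x) false).length y = some (j : Int)
      ∧ pvBest y rc j := by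
  set d := pvFirstIdx rc with hd
  set vals := PySem.List.sorted d.keys (fun x => x) false with hvals
  have hmemv : ∀ w : Int, w ∈ vals ↔ w ∈ rc := by
    intro w
    rw [hvals, PySem.List.mem_sorted]
    exact pvFirstIdx_mem_keys rc w
  have hpw : List.Pairwise (fun a b : Int => a ≤ b) vals := PySem.List.sorted_pairwise d.keys (fun x => x)
  obtain ⟨hp_le, hp_lt, hp_ge⟩ := PySem.List.bisectLeft_spec vals y hpw
  have hvne : vals ≠ [] := by
    obtain ⟨w, hw⟩ := List.exists_mem_of_ne_nil rc hne
    exact List.ne_nil_of_mem ((hmemv w).mpr hw)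
  have hn : 0 < vals.length := List.length_pos_of_ne_nil hvne
  have hmono : ∀ (a b : Nat) (hab : a ≤ b) (hb : b < vals.length),
      vals[a]'(Nat.lt_of_le_of_lt hab hb) ≤ vals[b] := by
    intro a b hab hb
    exact PySem.List.sorted_id_getElem_mono d.keys hab hb
  have hgetD : ∀ (i : Nat), (h : i < vals.length) → vals.getD i 0 = vals[i] := by
    intro i h
    exact List.getD_eq_getElem vals 0 h
  have hidxD : ∀ w ∈ rc, ∃ m : Nat, PySem.List.index? rc w = some m ∧ d.getD w 0 = (m : Int) := by
    intro w hw
    obtain ⟨m, hm⟩ := Option.isSome_iff_exists.mp ((PySem.List.index?_isSome_iff rc w).mpr hw)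
    refine ⟨m, hm, ?_⟩
    rw [PySem.Dict.getD_eq_get?_getD, hd, pvFirstIdx_get?, hm]
    rfl
  have hqget : ∀ w ∈ rc, ∃ (q : Nat) (hq : q < vals.length), vals[q] = w := by
    intro w hw
    obtain ⟨q, hq, hv⟩ := List.mem_iff_getElem.mp ((hmemv w).mpr hw)
    exact ⟨q, hq, hv⟩
  have main : ∀ v ∈ rc, (∀ w ∈ rc, |y - v| ≤ |y - w|) →
      (∀ w ∈ rc, |y - w| = |y - v| → d.getD v 0 ≤ d.getD w 0) →
      ∃ j : Nat, d.getD v 0 = (j : Int) ∧ pvBest y rc j := by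
    intro v hv hmin htie
    obtain ⟨m, hm, hgd⟩ := hidxD v hv
    refine ⟨m, hgd, pvBest_of_value y rc v m hm hmin ?_⟩
    intro w hw heq m' hm'
    obtain ⟨mw, hmw, hgdw⟩ := hidxD w hw
    have h1 := htie w hw heq
    rw [hgd, hgdw] at h1
    rw [hmw] at hm'
    injection hm' with h2
    omega
  simp only [pvQueryB]
  split_ifs with h0 hp0 hpn hcond
  · omega
  -- p = 0 : all values are ≥ y, the smallest value is closest
  · have h1 : vals.getD 0 0 = vals[0] := hgetD 0 hn
    have hv0 : vals[0] ∈ rc := (hmemv _).mp (List.getElem_mem hn)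
    have hy0 : y ≤ vals[0] := hp_ge 0 hn (by omega)
    have hmin0 : ∀ w ∈ rc, |y - vals[0]| ≤ |y - w| := by
      intro w hw
      obtain ⟨q, hq, rfl⟩ := hqget w hw
      have hyw : y ≤ vals[q] := hp_ge q hq (by omega)
      rw [pvAbs_le y _ hy0, pvAbs_le y _ hyw]
      have := hmono 0 q (by omega) hq
      omega
    have htie0 : ∀ w ∈ rc, |y - w| = |y - vals[0]| → d.getD vals[0] 0 ≤ d.getD w 0 := by
      intro w hw heq
      obtain ⟨q, hq, rfl⟩ := hqget w hw
      have hyw : y ≤ vals[q] := hp_ge q hq (by omega)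
      rw [pvAbs_le y _ hy0, pvAbs_le y _ hyw] at heq
      have hwv : vals[q] = vals[0] := by omega
      rw [hwv]
    obtain ⟨j, hj, hb⟩ := main vals[0] hv0 hmin0 htie0
    exact ⟨j, by rw [h1, hj], hb⟩
  -- p = n : all values are < y, the largest value is closest
  · have hlt : vals.length - 1 < vals.length := by omega
    have h1 : vals.getD (vals.length - 1) 0 = vals[vals.length - 1] := hgetD _ hlt
    have hvl : vals[vals.length - 1] ∈ rc := (hmemv _).mp (List.getElem_mem hlt)
    have hyl : vals[vals.length - 1] ≤ y := le_of_lt (hp_lt _ hlt (by omega))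
    have hminl : ∀ w ∈ rc, |y - vals[vals.length - 1]| ≤ |y - w| := by
      intro w hw
      obtain ⟨q, hq, rfl⟩ := hqget w hw
      have hyw : vals[q] ≤ y := le_of_lt (hp_lt q hq (by omega))
      rw [pvAbs_ge y _ hyl, pvAbs_ge y _ hyw]
      have := hmono q (vals.length - 1) (by omega) hlt
      omega
    have htiel : ∀ w ∈ rc, |y - w| = |y - vals[vals.length - 1]| →
        d.getD vals[vals.length - 1] 0 ≤ d.getD w 0 := by
      intro w hw heq
      obtain ⟨q, hq, rfl⟩ := hqget w hw
      have hyw : vals[q] ≤ y := le_of_lt (hp_lt q hq (by omega))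
      rw [pvAbs_ge y _ hyl, pvAbs_ge y _ hyw] at heq
      have hwv : vals[q] = vals[vals.length - 1] := by omega
      rw [hwv]
    obtain ⟨j, hj, hb⟩ := main vals[vals.length - 1] hvl hminl htiel
    exact ⟨j, by rw [h1, hj], hb⟩
  -- 0 < p < n, the lower candidate wins
  · have hplt : PySem.List.bisectLeft vals y - 1 < vals.length := by omega
    have hplt' : PySem.List.bisectLeft vals y < vals.length := by omega
    have hlo : vals.getD (PySem.List.bisectLeft vals y - 1) 0 = vals[PySem.List.bisectLeft vals y - 1] := hgetD _ hplt
    have hhi : vals.getD (PySem.List.bisectLeft vals y) 0 = vals[PySem.List.bisectLeft vals y] := hgetD _ hplt'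
    rw [hlo, hhi] at hcond
    have hloy : vals[PySem.List.bisectLeft vals y - 1] < y := hp_lt _ hplt (by omega)
    have hyhi : y ≤ vals[PySem.List.bisectLeft vals y] := hp_ge _ hplt' (by omega)
    have hside : ∀ w ∈ rc, (w ≤ vals[PySem.List.bisectLeft vals y - 1] ∧ |y - w| = y - w)
        ∨ (vals[PySem.List.bisectLeft vals y] ≤ w ∧ |y - w| = w - y) := by
      intro w hw
      obtain ⟨q, hq, rfl⟩ := hqget w hw
      rcases Nat.lt_or_ge q (PySem.List.bisectLeft vals y) with h | h
      · left
        have h2 := hmono q (PySem.List.bisectLeft vals y - 1) (by omega) hplt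
        exact ⟨h2, pvAbs_ge y _ (by omega)⟩
      · right
        have h2 := hmono (PySem.List.bisectLeft vals y) q h hq
        exact ⟨h2, pvAbs_le y _ (by omega)⟩
    have hvlo : vals[PySem.List.bisectLeft vals y - 1] ∈ rc := (hmemv _).mp (List.getElem_mem hplt)
    have hminlo : ∀ w ∈ rc, |y - vals[PySem.List.bisectLeft vals y - 1]| ≤ |y - w| := by
      intro w hw
      rw [pvAbs_ge y _ (le_of_lt hloy)]
      rcases hside w hw with ⟨hwle, habs⟩ | ⟨hwge, habs⟩
      · rw [habs]; omega
      · rw [habs]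
        rcases hcond with h | ⟨h, _⟩ <;> omega
    have htielo : ∀ w ∈ rc, |y - w| = |y - vals[PySem.List.bisectLeft vals y - 1]| →
        d.getD vals[PySem.List.bisectLeft vals y - 1] 0 ≤ d.getD w 0 := by
      intro w hw heq
      rw [pvAbs_ge y _ (le_of_lt hloy)] at heq
      rcases hside w hw with ⟨hwle, habs⟩ | ⟨hwge, habs⟩
      · rw [habs] at heq
        have hwv : w = vals[PySem.List.bisectLeft vals y - 1] := by omega
        rw [hwv]
      · rw [habs] at heq
        rcases hcond with h | ⟨h, hil⟩
        · omega
        · have hwv : w = vals[PySem.List.bisectLeft vals y] := by omega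
          rw [hwv]
          exact le_of_lt hil
    obtain ⟨j, hj, hb⟩ := main vals[PySem.List.bisectLeft vals y - 1] hvlo hminlo htielo
    exact ⟨j, by rw [hlo, hj], hb⟩
  -- 0 < p < n, the upper candidate wins
  · have hplt : PySem.List.bisectLeft vals y - 1 < vals.length := by omega
    have hplt' : PySem.List.bisectLeft vals y < vals.length := by omega
    have hlo : vals.getD (PySem.List.bisectLeft vals y - 1) 0 = vals[PySem.List.bisectLeft vals y - 1] := hgetD _ hplt
    have hhi : vals.getD (PySem.List.bisectLeft vals y) 0 = vals[PySem.List.bisectLeft vals y] := hgetD _ hplt'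
    rw [hlo, hhi] at hcond
    push_neg at hcond
    obtain ⟨hc1, hc2⟩ := hcond
    have hloy : vals[PySem.List.bisectLeft vals y - 1] < y := hp_lt _ hplt (by omega)
    have hyhi : y ≤ vals[PySem.List.bisectLeft vals y] := hp_ge _ hplt' (by omega)
    have hside : ∀ w ∈ rc, (w ≤ vals[PySem.List.bisectLeft vals y - 1] ∧ |y - w| = y - w)
        ∨ (vals[PySem.List.bisectLeft vals y] ≤ w ∧ |y - w| = w - y) := by
      intro w hw
      obtain ⟨q, hq, rfl⟩ := hqget w hw
      rcases Nat.lt_or_ge q (PySem.List.bisectLeft vals y) with h | h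
      · left
        have h2 := hmono q (PySem.List.bisectLeft vals y - 1) (by omega) hplt
        exact ⟨h2, pvAbs_ge y _ (by omega)⟩
      · right
        have h2 := hmono (PySem.List.bisectLeft vals y) q h hq
        exact ⟨h2, pvAbs_le y _ (by omega)⟩
    have hvhi : vals[PySem.List.bisectLeft vals y] ∈ rc := (hmemv _).mp (List.getElem_mem hplt')
    have hminhi : ∀ w ∈ rc, |y - vals[PySem.List.bisectLeft vals y]| ≤ |y - w| := by
      intro w hw
      rw [pvAbs_le y _ hyhi]
      rcases hside w hw with ⟨hwle, habs⟩ | ⟨hwge, habs⟩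
      · rw [habs]; omega
      · rw [habs]; omega
    have htiehi : ∀ w ∈ rc, |y - w| = |y - vals[PySem.List.bisectLeft vals y]| →
        d.getD vals[PySem.List.bisectLeft vals y] 0 ≤ d.getD w 0 := by
      intro w hw heq
      rw [pvAbs_le y _ hyhi] at heq
      rcases hside w hw with ⟨hwle, habs⟩ | ⟨hwge, habs⟩
      · rw [habs] at heq
        have hwlo : w = vals[PySem.List.bisectLeft vals y - 1] := by omega
        have hteq : y - vals[PySem.List.bisectLeft vals y - 1] = vals[PySem.List.bisectLeft vals y] - y := by omega
        have := hc2 hteq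
        rw [hwlo]
        exact this
      · rw [habs] at heq
        have hwv : w = vals[PySem.List.bisectLeft vals y] := by omega
        rw [hwv]
    obtain ⟨j, hj, hb⟩ := main vals[PySem.List.bisectLeft vals y] hvhi hminhi htiehi
    exact ⟨j, by rw [hhi, hj], hb⟩

-- per-query agreement
theorem pvQuery_agree (y : Int) (rc : List Int) :
    (pvScanA y rc).2 = pvQueryB (pvFirstIdx rc)
        (PySem.List.sorted (pvFirstIdx rc).keys (fun x => x) false)
        (PySem.List.sorted (pvFirstIdx rc).keys (fun x => x) false).length y := by
  by_cases hne : rc = []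
  · subst hne
    rfl
  · obtain ⟨j, hj, hstate, hbA⟩ := pvScanA_spec y rc hne
    obtain ⟨jb, hq, hbB⟩ := pvQueryB_best y rc hne
    rw [hstate, hq]
    have hjj := pvBest_unique y rc j jb hbA hbB
    simp [hjj]

-- ===== VERDICT (by name: the statement is the Claim_ definition above) =====
theorem find_closest_indices_spec : Claim_equal_find_closest_indices := by
  intro sc rc _ _
  unfold Spec_find_closest_indices find_closest_indices find_closest_indices_alt
  rw [PySem.List.foldl_append_singleton_eq_map, PySem.List.foldl_append_singleton_eq_map]
  exact List.map_congr_left (fun cc _ => by rw [pvQuery_agree])
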